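-- pv_equiv track=rewrite | github.com/priyansh-saxena1/embedderModel | core/chunker.py | _collect_block
-- ===== SOURCE A (Python) =====
-- from typing import List, Optional, Tuple
--
-- def _collect_block(lines: List[str], start: int) -> Tuple[List[str], int]:
--     """Collect a brace-delimited block starting at `start`."""
--     block = [lines[start]]
--     depth = lines[start].count("{") - lines[start].count("}")
--     j = start + 1
--     while j < len(lines) and depth > 0:
--         block.append(lines[j])
--         depth += lines[j].count("{") - lines[j].count("}")
--         j += 1
--     return block, j
-- ===== SOURCE B (Python) =====
-- from typing import List, Tuple
--
-- def _collect_block(lines: List[str], start: int) -> Tuple[List[str], int]: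
--     """Collect a brace-delimited block starting at `start`."""
--     n = len(lines)
--     deltas = [lines[k].count("{") - lines[k].count("}") for k in range(start, n)]
--     depths = []
--     d = 0
--     for x in deltas:
--         d += x
--         depths.append(d)
--     stop = next((i for i, d in enumerate(depths) if d <= 0), len(depths) - 1)
--     j = start + stop + 1
--     return [lines[k] for k in range(start, j)], j
-- ===== Notes on version B (the rewrite author's own statement) =====
-- stated objective: alternative
-- what changed: Replaces A's incremental while-loop (running depth counter with early stop) by a precompute-then-search decomposition: build the per-line brace-delta table and its running prefix sums for the whole tail, locate the first index where the depth closes, and slice the block out.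
-- outside the precondition, e.g. on _collect_block(['a'], 5): A raises IndexError, B returns ([], 5)
import Mathlib
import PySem

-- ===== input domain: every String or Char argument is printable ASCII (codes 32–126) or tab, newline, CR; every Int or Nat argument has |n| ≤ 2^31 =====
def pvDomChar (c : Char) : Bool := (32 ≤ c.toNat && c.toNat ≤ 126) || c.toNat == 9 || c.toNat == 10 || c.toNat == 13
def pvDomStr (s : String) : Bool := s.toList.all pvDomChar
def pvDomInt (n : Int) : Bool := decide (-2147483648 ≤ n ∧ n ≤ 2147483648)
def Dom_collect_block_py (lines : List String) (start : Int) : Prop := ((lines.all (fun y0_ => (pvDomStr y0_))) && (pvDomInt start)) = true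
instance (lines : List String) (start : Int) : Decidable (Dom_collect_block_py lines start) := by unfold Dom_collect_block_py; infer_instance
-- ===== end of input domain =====

-- B replaces A's incremental while-loop (depth counter with early stop) by a table decomposition:
-- precompute the per-line brace deltas and their running depths for the whole tail, then find the
-- first index where the depth closes and slice the block out; same values, a different decomposition.

-- net brace delta of one line: line.count("{") - line.count("}")  (shared by both ports, as in both Pythons)
def netBrace (s : String) : Int := (PySem.Str.count s "{" : Int) - (PySem.Str.count s "}" : Int)

-- ===== PORT A =====
-- the 'while j < len(lines) and depth > 0' loop of A
def collectA_loop (lines : List String) (block : List String) (depth : Int) (j : Int) :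
    List String × Int :=
  if _h : j < (lines.length : Int) ∧ 0 < depth then
    match PySem.List.pyGet? lines j with
    | some s => collectA_loop lines (block ++ [s]) (depth + netBrace s) (j + 1)
    | none => (block, j)   -- IndexError in Python; unreachable under Pre_
  else (block, j)
termination_by ((lines.length : Int) - j).toNat
decreasing_by omega

def collect_block_py (lines : List String) (start : Int) : List String × Int :=
  match PySem.List.pyGet? lines start with
  | none => ([], start + 1)   -- lines[start] raises IndexError: excluded by Pre_
  | some s => collectA_loop lines [s] (netBrace s) (start + 1)

-- ===== PORT B =====
def collect_block_py_alt (lines : List String) (start : Int) : List String × Int :=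
  let n : Int := lines.length
  -- deltas = [lines[k].count("{") - lines[k].count("}") for k in range(start, n)]
  let deltas := (PySem.List.pyRange start n 1).map (fun k => netBrace (PySem.List.pyGetD lines k ""))
  -- running prefix sums (the for-loop building `depths`)
  let depths := (deltas.foldl (fun (acc : List Int × Int) x => (acc.1 ++ [acc.2 + x], acc.2 + x)) ([], 0)).1
  -- stop = next((i for i, d in enumerate(depths) if d <= 0), len(depths) - 1)
  let stop : Int :=
    match depths.findIdx? (fun c => decide (c ≤ 0)) with
    | some i => (i : Int)
    | none => (depths.length : Int) - 1
  let j := start + stop + 1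
  ((PySem.List.pyRange start j 1).map (fun k => PySem.List.pyGetD lines k ""), j)

-- ===== PRECONDITION & SPEC =====
-- Pre_ excludes exactly the inputs where A raises IndexError on lines[start] (start outside [-len, len)).
def Pre_collect_block_py (lines : List String) (start : Int) : Prop :=
  PySem.Raise.InRange lines.length start
instance (lines : List String) (start : Int) : Decidable (Pre_collect_block_py lines start) := by
  unfold Pre_collect_block_py; infer_instance

def pvWitness_collect_block_py : List String × Int := (["int f() {", "  return 1;", "}"], 0)

def Spec_collect_block_py (lines : List String) (start : Int) (out : List String × Int) : Prop :=
  out = collect_block_py_alt lines start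
instance (lines : List String) (start : Int) (out : List String × Int) :
    Decidable (Spec_collect_block_py lines start out) := by
  unfold Spec_collect_block_py; infer_instance

-- ===== CLAIM (what is proved, stated in full; the proofs are below) =====
def Claim_equal_collect_block_py : Prop :=
  ∀ (lines : List String) (start : Int), Dom_collect_block_py lines start →
    Pre_collect_block_py lines start →
    Spec_collect_block_py lines start (collect_block_py lines start)

-- ===== LEMMAS AND PROOFS =====

-- running prefix sums of a list (what Source B's for-loop over `deltas` produces)
def cums : List Int → List Int
  | [] => []
  | x :: xs => x :: (cums xs).map (x + ·)

-- number of iterations A's while-loop performs, given the current depth and the remaining deltas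
def steps (d : Int) : List Int → Nat
  | [] => 0
  | x :: xs => if 0 < d then 1 + steps (d + x) xs else 0

lemma foldl_cums (L : List Int) :
    ∀ (acc : List Int) (c : Int),
      (L.foldl (fun (p : List Int × Int) x => (p.1 ++ [p.2 + x], p.2 + x)) (acc, c)).1
        = acc ++ (cums L).map (c + ·) := by
  induction L with
  | nil => intro acc c; simp [cums]
  | cons x xs ih =>
    intro acc c
    simp only [List.foldl_cons, cums, List.map_cons, List.map_map]
    rw [ih]
    simp [List.append_assoc, Function.comp_def, add_assoc]

lemma length_cums (L : List Int) : (cums L).length = L.length := by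
  induction L with
  | nil => rfl
  | cons x xs ih => simp [cums, ih]

lemma steps_eq_findIdx (rest : List Int) :
    ∀ d : Int,
      steps d rest
        = ((cums (d :: rest)).findIdx? (fun c => decide (c ≤ 0))).getD rest.length := by
  induction rest with
  | nil =>
    intro d
    by_cases h : d ≤ 0 <;>
      simp [steps, cums, List.findIdx?_cons, List.findIdx?_nil, h]
  | cons x xs ih =>
    intro d
    by_cases h : d ≤ 0
    · have : ¬ 0 < d := by omega
      simp [steps, cums, List.findIdx?_cons, h, this]
    · have hd : 0 < d := by omega
      have hcons : cums (d :: x :: xs) = d :: cums ((d + x) :: xs) := by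
        simp [cums, List.map_map, Function.comp_def, add_assoc]
      rw [hcons]
      rw [List.findIdx?_cons]
      simp only [h, decide_false]
      simp only [steps, hd, if_true]
      rw [ih (d + x)]
      cases hfi : (cums ((d + x) :: xs)).findIdx? (fun c => decide (c ≤ 0)) <;>
        simp [List.length_cons, Nat.add_comm]
  -- findIdx? on the cons shifts indices by one; both branches are arithmetic

-- the deltas of the tail of `lines` from index j on, with Python (possibly negative) indexing
def deltasFrom (lines : List String) (j : Int) : List Int :=
  (PySem.List.pyRange j (lines.length : Int) 1).map
    (fun k => netBrace (PySem.List.pyGetD lines k ""))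

lemma pyGet?_eq_some_getD (lines : List String) (i : Int)
    (h : PySem.Raise.InRange lines.length i) :
    PySem.List.pyGet? lines i = some (PySem.List.pyGetD lines i "") := by
  obtain ⟨h1, h2⟩ := h
  simp [PySem.List.pyGet?, PySem.List.pyGetD, PySem.List.pyIdx?]
  split_ifs with hneg
  · have hlt : i.toNat < lines.length := by omega
    simp [Option.bind, List.getElem?_eq_getElem hlt]
  · have hlt : lines.length - (-i).toNat < lines.length := by omega
    simp [Option.bind, List.getElem?_eq_getElem hlt]

-- characterisation of A's loop in terms of `steps` over the remaining deltas
lemma collectA_loop_eq (lines : List String) :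
    ∀ (fuel : Nat) (block : List String) (depth j : Int),
      ((lines.length : Int) - j).toNat ≤ fuel →
      -(lines.length : Int) < j →
      collectA_loop lines block depth j =
        (block ++ (PySem.List.pyRange j (j + (steps depth (deltasFrom lines j) : Int)) 1).map
            (fun k => PySem.List.pyGetD lines k ""),
         j + (steps depth (deltasFrom lines j) : Int)) := by
  intro fuel
  induction fuel with
  | zero =>
    intro block depth j hfuel hj
    have hn : (lines.length : Int) ≤ j := by omega
    have hnil : deltasFrom lines j = [] := by
      simp [deltasFrom, PySem.List.pyRange_one_eq_nil hn]
    rw [collectA_loop]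
    have : ¬ (j < (lines.length : Int) ∧ 0 < depth) := by omega
    simp [this, hnil, steps, PySem.List.pyRange_one_eq_nil (le_refl j)]
  | succ m ih =>
    intro block depth j hfuel hj
    rw [collectA_loop]
    by_cases hc : j < (lines.length : Int) ∧ 0 < depth
    · have hin : PySem.Raise.InRange lines.length j := ⟨by omega, hc.1⟩
      rw [dif_pos hc, pyGet?_eq_some_getD lines j hin]
      have hcons : deltasFrom lines j
          = netBrace (PySem.List.pyGetD lines j "") :: deltasFrom lines (j + 1) := by
        simp [deltasFrom, PySem.List.pyRange_one_cons hc.1]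
      rw [hcons]
      simp only [steps, hc.2, if_true]
      rw [ih (block ++ [PySem.List.pyGetD lines j ""])
            (depth + netBrace (PySem.List.pyGetD lines j "")) (j + 1) (by omega) (by omega)]
      set t : Nat := steps (depth + netBrace (PySem.List.pyGetD lines j ""))
                          (deltasFrom lines (j + 1)) with ht
      have hjt : j < j + ((1 + t : Nat) : Int) := by push_cast; omega
      have harith : j + ((1 + t : Nat) : Int) = (j + 1) + (t : Int) := by push_cast; ring
      rw [harith, PySem.List.pyRange_one_cons (by omega : j < (j + 1) + (t : Int))]
      simp [List.append_assoc]
    · rw [dif_neg hc]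
      rcases not_and_or.mp hc with hjn | hd
      · have hn : (lines.length : Int) ≤ j := by omega
        have hnil : deltasFrom lines j = [] := by
          simp [deltasFrom, PySem.List.pyRange_one_eq_nil hn]
        simp [hnil, steps, PySem.List.pyRange_one_eq_nil (le_refl j)]
      · have hd0 : ¬ 0 < depth := hd
        have h0 : steps depth (deltasFrom lines j) = 0 := by
          cases hL : deltasFrom lines j <;> simp [steps, hd0]
        simp [h0, PySem.List.pyRange_one_eq_nil (le_refl j)]

-- ===== VERDICT (by name: the statement is the Claim_ definition above) =====
theorem collect_block_py_spec : Claim_equal_collect_block_py := by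
  intro lines start _hdom hpre
  unfold Spec_collect_block_py
  obtain ⟨h1, h2⟩ := hpre
  -- A's side
  set s0 := PySem.List.pyGetD lines start "" with hs0
  have hA : collect_block_py lines start = collectA_loop lines [s0] (netBrace s0) (start + 1) := by
    unfold collect_block_py
    rw [pyGet?_eq_some_getD lines start ⟨h1, h2⟩]
  rw [hA]
  rw [collectA_loop_eq lines ((lines.length : Int) - (start + 1)).toNat [s0] (netBrace s0)
        (start + 1) (le_refl _) (by omega)]
  -- B's side
  unfold collect_block_py_alt
  simp only []
  have hdeltas : (PySem.List.pyRange start (lines.length : Int) 1).map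
      (fun k => netBrace (PySem.List.pyGetD lines k ""))
      = netBrace s0 :: deltasFrom lines (start + 1) := by
    simp [deltasFrom, PySem.List.pyRange_one_cons h2, hs0]
  rw [hdeltas]
  rw [foldl_cums (netBrace s0 :: deltasFrom lines (start + 1)) [] 0]
  have hmap : (cums (netBrace s0 :: deltasFrom lines (start + 1))).map ((0 : Int) + ·)
      = cums (netBrace s0 :: deltasFrom lines (start + 1)) := by
    simp
  rw [List.nil_append, hmap]
  set rest := deltasFrom lines (start + 1) with hrest
  set t : Nat := steps (netBrace s0) rest with ht
  have hfind := steps_eq_findIdx rest (netBrace s0)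
  have hstop : (match (cums (netBrace s0 :: rest)).findIdx? (fun c => decide (c ≤ 0)) with
      | some i => (i : Int)
      | none => (((cums (netBrace s0 :: rest)).length : Int) - 1)) = (t : Int) := by
    have hlen : (cums (netBrace s0 :: rest)).length = rest.length + 1 := by
      rw [length_cums]; simp
    cases hfi : (cums (netBrace s0 :: rest)).findIdx? (fun c => decide (c ≤ 0)) with
    | some i =>
      rw [ht, hfind, hfi]; simp
    | none =>
      rw [ht, hfind, hfi]; simp [hlen]
  rw [hstop]
  have hj : start + (t : Int) + 1 = (start + 1) + (t : Int) := by ring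
  rw [hj, PySem.List.pyRange_one_cons (by omega : start < (start + 1) + (t : Int))]
  simp [hs0]
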